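-- pv_equiv track=rewrite | github.com/Pronoy-Deb/Code | Python/Algorithm/GCD_Sum_of_All_Subarrays.py | make
-- ===== SOURCE A (Python) =====
-- from math import log2
-- from typing import List
--
-- def gcd(a: int, b: int) -> int:
--     while b: a, b = b, a % b
--     return a
--
-- def make(ar: List[int], n: int) -> List[List[int]]:
--     log_n = int(log2(n)) + 1
--     tab = [[0] * log_n for _ in range(n)]
--     for i in range(n): tab[i][0] = ar[i]
--     for j in range(1, log_n):
--         for i in range(n - (1 << j) + 1):
--             tab[i][j] = gcd(tab[i][j-1], tab[i + (1 << (j-1))][j-1])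
--     return tab
--
-- n = 4
--
-- ar = [4, 6, 2, 8]
-- ===== SOURCE B (Python) =====
-- from math import log2
-- from typing import List
--
--
-- def _gcd(a: int, b: int) -> int:
--     while b: a, b = b, a % b
--     return a
--
--
-- def _range_gcd(ar, i, w):
--     # gcd of ar[i : i+w] computed by a direct left fold over the slice
--     g = ar[i]
--     for x in ar[i + 1:i + w]:
--         g = _gcd(g, x)
--     return g
--
--
-- def make(ar: List[int], n: int) -> List[List[int]]:
--     log_n = int(log2(n)) + 1
--     return [[(ar[i] if j == 0 else
--               _range_gcd(ar, i, 1 << j) if i + (1 << j) <= n else 0)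
--              for j in range(log_n)]
--             for i in range(n)]
-- ===== Notes on version B (the rewrite author's own statement) =====
-- stated objective: alternative
-- what changed: B drops the dynamic-programming recurrence tab[i][j] = gcd(tab[i][j-1], tab[i+2^(j-1)][j-1]) and instead builds each cell independently with nested comprehensions, folding gcd directly over the subarray ar[i:i+2^j]; same table shape, log_n formula, bounds and zero cells.
import Mathlib
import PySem

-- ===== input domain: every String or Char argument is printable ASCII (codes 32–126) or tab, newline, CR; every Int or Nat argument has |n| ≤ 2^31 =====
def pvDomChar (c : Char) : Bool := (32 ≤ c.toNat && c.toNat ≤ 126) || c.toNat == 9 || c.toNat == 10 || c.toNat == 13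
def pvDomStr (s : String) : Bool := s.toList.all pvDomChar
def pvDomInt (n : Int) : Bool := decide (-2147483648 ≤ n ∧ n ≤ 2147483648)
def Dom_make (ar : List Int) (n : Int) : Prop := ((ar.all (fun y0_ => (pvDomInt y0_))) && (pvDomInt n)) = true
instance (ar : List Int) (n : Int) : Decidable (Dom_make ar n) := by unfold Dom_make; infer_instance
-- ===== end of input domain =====

-- B replaces the sparse-table DP recurrence by a direct gcd fold over each subarray ar[i:i+2^j];
-- same table shape and zero cells, a different (alternative) decomposition.

-- ===== PORT A =====
-- termination helper for the Euclidean loop 'while b: a, b = b, a % b'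
theorem pyMod_natAbs_lt (a b : Int) (h : b ≠ 0) : (PySem.Int.mod a b).natAbs < b.natAbs := by
  rcases lt_or_gt_of_ne h with hb | hb
  · have := PySem.Int.mod_neg_bounds a hb
    omega
  · have h1 := PySem.Int.mod_nonneg a hb
    have h2 := PySem.Int.mod_lt a hb
    omega

-- def gcd(a, b): while b: a, b = b, a % b; return a   (Python '%' = PySem.Int.mod)
def pyGcd (a b : Int) : Int :=
  if hb : b = 0 then a else pyGcd b (PySem.Int.mod a b)
termination_by b.natAbs
decreasing_by exact pyMod_natAbs_lt a b (by exact hb)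

-- Port of A. Under Pre_make (1 ≤ n ≤ len ar) all loop indices are in range, so:
-- int(log2(n)) + 1 is Nat.log2 n.toNat + 1 (float log2 is exact here for n ≤ 2^31);
-- range(n) / range(1, log_n) are List.range / List.range' 1 (L-1);
-- range(n - (1 << j) + 1) has max(0, n - 2^j + 1) elements = Nat N + 1 - 2^j;
-- in-range ar[i] / tab[i] reads are getD, tab[i][j] = v is set (exact for these indices).
def make (ar : List Int) (n : Int) : List (List Int) :=
  let N := n.toNat
  let L := Nat.log2 N + 1                                   -- log_n = int(log2(n)) + 1
  let tab0 : List (List Int) := (List.range N).map (fun _ => List.replicate L (0 : Int))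
  let tab1 := (List.range N).foldl                          -- for i in range(n): tab[i][0] = ar[i]
    (fun tab i => tab.set i ((tab.getD i []).set 0 (ar.getD i 0))) tab0
  (List.range' 1 (L - 1)).foldl (fun tab j =>               -- for j in range(1, log_n):
    (List.range (N + 1 - 2 ^ j)).foldl (fun tab i =>        --   for i in range(n - (1 << j) + 1):
      tab.set i ((tab.getD i []).set j
        (pyGcd ((tab.getD i []).getD (j - 1) 0)
               ((tab.getD (i + 2 ^ (j - 1)) []).getD (j - 1) 0)))) tab) tab1

-- ===== PORT B =====
-- _range_gcd(ar, i, w): left fold of gcd over the slice ar[i+1:i+w], seeded with ar[i]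
def rangeGcd (ar : List Int) (i w : Nat) : Int :=
  ((ar.drop (i + 1)).take (w - 1)).foldl pyGcd (ar.getD i 0)

-- Port of B: the two nested comprehensions of Source B.
def make_alt (ar : List Int) (n : Int) : List (List Int) :=
  let N := n.toNat
  let L := Nat.log2 N + 1
  (List.range N).map (fun i =>
    (List.range L).map (fun j =>
      if j = 0 then ar.getD i 0
      else if i + 2 ^ j ≤ N then rangeGcd ar i (2 ^ j)
      else 0))

-- ===== PRECONDITION & SPEC =====
-- Pre_make: exactly the inputs where Python A returns: n ≥ 1 (else log2 raises a ValueError)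
-- and n ≤ len(ar) (else tab[i][0] = ar[i] raises an IndexError).
def Pre_make (ar : List Int) (n : Int) : Prop := 1 ≤ n ∧ n ≤ (ar.length : Int)
instance (ar : List Int) (n : Int) : Decidable (Pre_make ar n) := by unfold Pre_make; infer_instance
def pvWitness_make : List Int × Int := ([4, 6, 2, 8], 4)

def Spec_make (ar : List Int) (n : Int) (out : List (List Int)) : Prop := out = make_alt ar n
instance (ar : List Int) (n : Int) (out : List (List Int)) : Decidable (Spec_make ar n out) := by unfold Spec_make; infer_instance

-- ===== CLAIM (what is proved, stated in full; the proofs are below) =====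
def Claim_equal_make : Prop := ∀ (ar : List Int) (n : Int), Dom_make ar n → Pre_make ar n → Spec_make ar n (make ar n)

-- ===== LEMMAS AND PROOFS =====

def gcdSpec (a b : Int) : Int :=
  if 0 < b then (Int.gcd a b : Int) else if b < 0 then -(Int.gcd a b : Int) else a

theorem gcd_pyMod (a b : Int) : Int.gcd b (PySem.Int.mod a b) = Int.gcd a b := by
  have h := PySem.Int.floordiv_mul_add_mod a b
  have h2 : PySem.Int.mod a b = a + (-(PySem.Int.floordiv a b)) * b := by linarith
  rw [h2, Int.gcd_add_mul_right_right, Int.gcd_comm]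

theorem pyGcd_eq (a b : Int) : pyGcd a b = gcdSpec a b := by
  generalize hm : b.natAbs = m
  induction m using Nat.strong_induction_on generalizing a b with
  | _ m ih =>
  by_cases hb : b = 0
  · rw [pyGcd]; simp [hb, gcdSpec]
  · rw [pyGcd]; simp only [hb, dite_false]
    have hlt : (PySem.Int.mod a b).natAbs < m := hm ▸ pyMod_natAbs_lt a b hb
    rw [ih _ hlt b (PySem.Int.mod a b) rfl]
    have hgcd := gcd_pyMod a b
    have hpos0 : 0 < Int.gcd a b := Int.gcd_pos_of_ne_zero_right a hb
    rcases lt_or_gt_of_ne hb with hneg | hpos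
    · have hmb := PySem.Int.mod_neg_bounds a hneg
      by_cases hr : PySem.Int.mod a b = 0
      · have hdvd : b ∣ a := (PySem.Int.mod_eq_zero_iff_dvd a b).mp hr
        have habs : Int.gcd a b = b.natAbs := Int.gcd_eq_natAbs_right hdvd
        rw [hr]
        rw [gcdSpec, gcdSpec]
        rw [if_neg (by omega : ¬ (0:Int) < 0), if_neg (by omega : ¬ (0:Int) < 0)]
        rw [if_neg (by omega : ¬ (0:Int) < b), if_pos hneg]
        omega
      · have hrneg : PySem.Int.mod a b < 0 := by omega
        rw [gcdSpec, gcdSpec]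
        rw [if_neg (by omega), if_pos hrneg, if_neg (by omega), if_pos hneg, hgcd]
    · have h1 := PySem.Int.mod_nonneg a hpos
      by_cases hr : PySem.Int.mod a b = 0
      · have hdvd : b ∣ a := (PySem.Int.mod_eq_zero_iff_dvd a b).mp hr
        have habs : Int.gcd a b = b.natAbs := Int.gcd_eq_natAbs_right hdvd
        rw [hr, gcdSpec, gcdSpec]
        rw [if_neg (by omega : ¬ (0:Int) < 0), if_neg (by omega : ¬ (0:Int) < 0), if_pos hpos]
        omega
      · have hrpos : 0 < PySem.Int.mod a b := by omega
        rw [gcdSpec, gcdSpec, if_pos hrpos, if_pos hpos, hgcd]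

theorem gcdSpec_natAbs (a b : Int) (hb : b ≠ 0) : (gcdSpec a b).natAbs = Int.gcd a b := by
  have := Int.gcd_pos_of_ne_zero_right a hb
  rcases lt_or_gt_of_ne hb with h | h
  · simp [gcdSpec, h, not_lt.mpr (le_of_lt h)]
  · simp [gcdSpec, h]

theorem pyGcd_zero_left (a : Int) : pyGcd 0 a = a := by
  rw [pyGcd_eq]
  have h0 : Int.gcd 0 a = a.natAbs := by simp [Int.gcd]
  rcases lt_trichotomy a 0 with h | h | h
  · rw [gcdSpec, if_neg (by omega), if_pos h, h0]; omega
  · simp [gcdSpec, h]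
  · rw [gcdSpec, if_pos h, h0]; omega

theorem pyGcd_zero_right (a : Int) : pyGcd a 0 = a := by rw [pyGcd]; simp

theorem pyGcd_assoc (a b c : Int) : pyGcd (pyGcd a b) c = pyGcd a (pyGcd b c) := by
  by_cases hc : c = 0
  · subst hc; rw [pyGcd_zero_right, pyGcd_zero_right]
  by_cases hb : b = 0
  · subst hb; rw [pyGcd_zero_right, pyGcd_zero_left]
  rw [pyGcd_eq a b, pyGcd_eq _ c, pyGcd_eq b c, pyGcd_eq a _]
  have habs1 : (gcdSpec a b).natAbs = Int.gcd a b := gcdSpec_natAbs a b hb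
  have habs2 : (gcdSpec b c).natAbs = Int.gcd b c := gcdSpec_natAbs b c hc
  have hsign : (0 < gcdSpec b c ↔ 0 < c) ∧ (gcdSpec b c < 0 ↔ c < 0) := by
    have := Int.gcd_pos_of_ne_zero_right b hc
    rcases lt_or_gt_of_ne hc with h | h <;>
      constructor <;> simp [gcdSpec, h, not_lt.mpr (le_of_lt h)] <;> omega
  have hassoc : Nat.gcd (Int.gcd a b) c.natAbs = Nat.gcd a.natAbs (Int.gcd b c) := by
    simp only [Int.gcd]
    exact Nat.gcd_assoc _ _ _
  rcases lt_or_gt_of_ne hc with h | h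
  · have hbc_neg : gcdSpec b c < 0 := hsign.2.mpr h
    have l1 : gcdSpec (gcdSpec a b) c = -(Nat.gcd (Int.gcd a b) c.natAbs : Int) := by
      rw [gcdSpec, if_neg (by omega), if_pos h]
      rw [show Int.gcd (gcdSpec a b) c = Nat.gcd (Int.gcd a b) c.natAbs from by
        rw [Int.gcd, habs1]]
    have l2 : gcdSpec a (gcdSpec b c) = -(Nat.gcd a.natAbs (Int.gcd b c) : Int) := by
      rw [gcdSpec, if_neg (by omega), if_pos hbc_neg]
      rw [show Int.gcd a (gcdSpec b c) = Nat.gcd a.natAbs (Int.gcd b c) from by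
        rw [Int.gcd, habs2]]
    rw [l1, l2, hassoc]
  · have hbc_pos : 0 < gcdSpec b c := hsign.1.mpr h
    have l1 : gcdSpec (gcdSpec a b) c = (Nat.gcd (Int.gcd a b) c.natAbs : Int) := by
      rw [gcdSpec, if_pos h]
      rw [show Int.gcd (gcdSpec a b) c = Nat.gcd (Int.gcd a b) c.natAbs from by
        rw [Int.gcd, habs1]]
    have l2 : gcdSpec a (gcdSpec b c) = (Nat.gcd a.natAbs (Int.gcd b c) : Int) := by
      rw [gcdSpec, if_pos hbc_pos]
      rw [show Int.gcd a (gcdSpec b c) = Nat.gcd a.natAbs (Int.gcd b c) from by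
        rw [Int.gcd, habs2]]
    rw [l1, l2, hassoc]

-- fold of pyGcd: peel off the seed
theorem foldl_pyGcd (l : List Int) (x : Int) :
    l.foldl pyGcd x = pyGcd x (l.foldl pyGcd 0) := by
  induction l generalizing x with
  | nil => simp [List.foldl_nil, pyGcd_zero_right]
  | cons y l ih =>
    simp only [List.foldl_cons]
    rw [ih (pyGcd x y), ih (pyGcd 0 y), pyGcd_zero_left, pyGcd_assoc]

-- the segment ar[i : i+w] and its gcd
def seg (ar : List Int) (i w : Nat) : List Int := (ar.drop i).take w
def segGcd (l : List Int) : Int := l.foldl pyGcd 0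

theorem segGcd_append (l1 l2 : List Int) :
    segGcd (l1 ++ l2) = pyGcd (segGcd l1) (segGcd l2) := by
  simp only [segGcd, List.foldl_append]
  exact foldl_pyGcd l2 _

theorem seg_split (ar : List Int) (i w1 w2 : Nat) :
    seg ar i (w1 + w2) = seg ar i w1 ++ seg ar (i + w1) w2 := by
  simp only [seg, List.take_add, List.drop_drop]
  try rw [Nat.add_comm w1 i]

theorem rangeGcd_eq_segGcd (ar : List Int) (i w : Nat) (hi : i < ar.length) (hw : 1 ≤ w) :
    rangeGcd ar i w = segGcd (seg ar i w) := by
  have hdrop : ar.drop i = ar[i] :: ar.drop (i + 1) := List.drop_eq_getElem_cons hi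
  obtain ⟨w', rfl⟩ : ∃ w', w = w' + 1 := ⟨w - 1, by omega⟩
  have hget : ar.getD i 0 = ar[i] := by
    rw [List.getD_eq_getElem?_getD, List.getElem?_eq_getElem hi, Option.getD_some]
  simp only [rangeGcd, seg, hdrop, List.take_succ_cons, Nat.add_sub_cancel, segGcd,
    List.foldl_cons, pyGcd_zero_left, hget]

theorem seg_single (ar : List Int) (i : Nat) (hi : i < ar.length) :
    segGcd (seg ar i 1) = ar.getD i 0 := by
  have hdrop : ar.drop i = ar[i] :: ar.drop (i + 1) := List.drop_eq_getElem_cons hi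
  have hget : ar.getD i 0 = ar[i] := by
    rw [List.getD_eq_getElem?_getD, List.getElem?_eq_getElem hi, Option.getD_some]
  simp only [seg, hdrop, List.take_succ_cons, List.take_zero, segGcd, List.foldl_cons,
    List.foldl_nil, pyGcd_zero_left, hget]

-- the target table entry and partially-filled table
def entry (ar : List Int) (N i j : Nat) : Int :=
  if i + 2 ^ j ≤ N then segGcd (seg ar i (2 ^ j)) else 0

def ptab (ar : List Int) (N L J : Nat) : List (List Int) :=
  (List.range N).map (fun i => (List.range L).map (fun j => if j ≤ J then entry ar N i j else 0))

theorem entry_rec (ar : List Int) (N i j : Nat) (hj : 1 ≤ j) (hij : i + 2 ^ j ≤ N) :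
    entry ar N i j = pyGcd (entry ar N i (j - 1)) (entry ar N (i + 2 ^ (j - 1)) (j - 1)) := by
  have hpow : 2 ^ j = 2 ^ (j - 1) + 2 ^ (j - 1) := by
    cases j with
    | zero => omega
    | succ k => rw [Nat.add_sub_cancel, pow_succ, Nat.mul_two]
  have hdpos : 0 < 2 ^ (j - 1) := Nat.two_pow_pos _
  have h1 : i + 2 ^ (j - 1) ≤ N := by omega
  have h2 : i + 2 ^ (j - 1) + 2 ^ (j - 1) ≤ N := by omega
  rw [entry, entry, entry, if_pos hij, if_pos h1, if_pos h2, hpow,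
    seg_split ar i (2 ^ (j-1)) (2 ^ (j-1)), segGcd_append]

-- generic helpers for lists built as maps over List.range
theorem set_map_range {α : Type} (N m : Nat) (_hm : m < N) (f : Nat → α) (v : α) :
    ((List.range N).map f).set m v = (List.range N).map (fun i => if i = m then v else f i) := by
  apply List.ext_getElem
  · simp
  · intro k h1 h2
    simp only [List.getElem_set, List.getElem_map, List.getElem_range]
    split_ifs with h3 h4 h4 <;> first | rfl | omega

theorem getD_map_range' {α : Type} (N m : Nat) (hm : m < N) (f : Nat → α) (d : α) :
    ((List.range N).map f).getD m d = f m := by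
  rw [List.getD_eq_getElem _ _ (by simp [hm])]
  simp

theorem map_range_congr {α : Type} (N : Nat) (f g : Nat → α)
    (h : ∀ i, i < N → f i = g i) :
    (List.range N).map f = (List.range N).map g := by
  apply List.map_congr_left
  intro i hi
  exact h i (List.mem_range.mp hi)

-- one pass of 'set row i' over range M, rows < M become new, the rest stay old
theorem foldl_set_rows (N M : Nat) (hM : M ≤ N) (old new : Nat → List Int)
    (step : List (List Int) → Nat → List (List Int))
    (hstep : ∀ (t : List (List Int)) (i : Nat), i < M →
        t = (List.range N).map (fun k => if k < i then new k else old k) →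
        step t i = (List.range N).map (fun k => if k < i + 1 then new k else old k)) :
    (List.range M).foldl step ((List.range N).map old) =
      (List.range N).map (fun k => if k < M then new k else old k) := by
  induction M with
  | zero => simp
  | succ m ih =>
    rw [List.range_succ, List.foldl_append, List.foldl_cons, List.foldl_nil]
    rw [ih (by omega) (fun t i hi ht => hstep t i (by omega) ht)]
    exact hstep _ m (by omega) rfl


-- the init loop 'for i in range(n): tab[i][0] = ar[i]' fills column 0
theorem init_eq (ar : List Int) (N L : Nat) (hN : N ≤ ar.length) (hL : 1 ≤ L) :
    (List.range N).foldl (fun tab i => tab.set i ((tab.getD i []).set 0 (ar.getD i 0)))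
      ((List.range N).map (fun _ => List.replicate L (0 : Int)))
    = ptab ar N L 0 := by
  have hrep : List.replicate L (0 : Int) = (List.range L).map (fun _ => (0 : Int)) := by
    rw [List.map_const', List.length_range]
  rw [foldl_set_rows N N (le_refl N) (fun _ => List.replicate L (0 : Int))
      (fun i => (List.range L).map (fun j => if j ≤ 0 then entry ar N i j else 0))
      _ ?hstep]
  · rw [ptab]
    apply map_range_congr
    intro i hi
    rw [if_pos hi]
  case hstep =>
    intro t i hi ht
    subst ht
    rw [getD_map_range' N i hi, if_neg (by omega)]
    rw [hrep, set_map_range L 0 (by omega)]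
    rw [set_map_range N i hi]
    apply map_range_congr
    intro k hk
    by_cases hki : k = i
    · subst hki
      rw [if_pos rfl, if_pos (by omega)]
      apply map_range_congr
      intro j hj
      by_cases hj0 : j = 0
      · subst hj0
        rw [if_pos rfl, if_pos (le_refl 0)]
        rw [entry, if_pos (by omega : k + 2 ^ 0 ≤ N)]
        rw [pow_zero, seg_single ar k (by omega)]
      · rw [if_neg hj0, if_neg (by omega)]
    · rw [if_neg hki]
      by_cases hlt : k < i
      · rw [if_pos hlt, if_pos (by omega)]
      · rw [if_neg hlt, if_neg (by omega)]

-- one pass of the j-loop turns column J = j-1 tables into column j tables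
theorem pass_eq (ar : List Int) (N L j : Nat) (_hN : N ≤ ar.length)
    (hj : 1 ≤ j) (hjL : j < L) (h2 : 2 ^ j ≤ N) :
    (List.range (N + 1 - 2 ^ j)).foldl (fun tab i =>
      tab.set i ((tab.getD i []).set j
        (pyGcd ((tab.getD i []).getD (j - 1) 0)
               ((tab.getD (i + 2 ^ (j - 1)) []).getD (j - 1) 0)))) (ptab ar N L (j - 1))
    = ptab ar N L j := by
  have hpow : 2 ^ j = 2 ^ (j - 1) + 2 ^ (j - 1) := by
    cases j with
    | zero => omega
    | succ k => rw [Nat.add_sub_cancel, pow_succ, Nat.mul_two]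
  have hdpos : 0 < 2 ^ (j - 1) := Nat.two_pow_pos _
  have hM : N + 1 - 2 ^ j ≤ N := by omega
  rw [ptab]
  rw [foldl_set_rows N (N + 1 - 2 ^ j) hM
      (fun i => (List.range L).map (fun j' => if j' ≤ j - 1 then entry ar N i j' else 0))
      (fun i => (List.range L).map (fun j' => if j' ≤ j then entry ar N i j' else 0))
      _ ?hstep]
  · rw [ptab]
    apply map_range_congr
    intro i hi
    by_cases him : i < N + 1 - 2 ^ j
    · rw [if_pos him]
    · rw [if_neg him]
      apply map_range_congr
      intro j' hj'
      by_cases hjjx : j' = j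
      · subst hjjx
        rw [if_neg (by omega), if_pos (le_refl j')]
        rw [entry, if_neg (by omega)]
      · by_cases hle : j' ≤ j - 1
        · rw [if_pos hle, if_pos (by omega)]
        · rw [if_neg hle, if_neg (by omega)]
  case hstep =>
    intro t i hi ht
    subst ht
    have hiN : i < N := by omega
    have hi2N : i + 2 ^ (j - 1) < N := by omega
    rw [getD_map_range' N i hiN, if_neg (by omega)]
    rw [getD_map_range' N (i + 2 ^ (j - 1)) hi2N, if_neg (by omega)]
    rw [getD_map_range' L (j - 1) (by omega), getD_map_range' L (j - 1) (by omega)]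
    rw [if_pos (le_refl (j - 1)), if_pos (le_refl (j - 1))]
    rw [set_map_range L j hjL]
    rw [set_map_range N i hiN]
    apply map_range_congr
    intro k hk
    by_cases hki : k = i
    · subst hki
      rw [if_pos rfl, if_pos (by omega)]
      apply map_range_congr
      intro j' hj'
      by_cases hjj : j' = j
      · subst hjj
        rw [if_pos rfl, if_pos (le_refl j')]
        exact (entry_rec ar N k j' hj (by omega)).symm
      · by_cases hle : j' ≤ j - 1
        · rw [if_neg hjj, if_pos hle, if_pos (by omega)]
        · rw [if_neg hjj, if_neg hle, if_neg (by omega)]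
    · rw [if_neg hki]
      by_cases hlt : k < i
      · rw [if_pos hlt, if_pos (by omega)]
      · rw [if_neg hlt, if_neg (by omega)]

-- the whole j-loop
theorem outer_eq (ar : List Int) (N L : Nat) (hN : N ≤ ar.length) (hN1 : 1 ≤ N)
    (hLlog : L = Nat.log2 N + 1) :
    ∀ m, m ≤ L - 1 →
    (List.range' 1 m).foldl (fun tab j =>
      (List.range (N + 1 - 2 ^ j)).foldl (fun tab i =>
        tab.set i ((tab.getD i []).set j
          (pyGcd ((tab.getD i []).getD (j - 1) 0)
                 ((tab.getD (i + 2 ^ (j - 1)) []).getD (j - 1) 0)))) tab) (ptab ar N L 0)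
    = ptab ar N L m := by
  intro m
  induction m with
  | zero => intro _; rfl
  | succ m ih =>
    intro hm
    rw [List.range'_concat, List.foldl_append, List.foldl_cons, List.foldl_nil]
    rw [ih (by omega)]
    have h1m : 1 + 1 * m = m + 1 := by omega
    rw [h1m]
    have h2 : 2 ^ (m + 1) ≤ N := by
      calc 2 ^ (m + 1) ≤ 2 ^ Nat.log2 N := Nat.pow_le_pow_right (by omega) (by omega)
        _ ≤ N := Nat.log2_self_le (by omega)
    have := pass_eq ar N L (m + 1) hN (by omega) (by omega) h2
    rw [Nat.add_sub_cancel] at this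
    exact this

-- A builds exactly the filled table
theorem make_eq_ptab (ar : List Int) (n : Int) (hpre : Pre_make ar n) :
    make ar n = ptab ar n.toNat (Nat.log2 n.toNat + 1) (Nat.log2 n.toNat + 1 - 1) := by
  obtain ⟨h1, h2⟩ := hpre
  have hN1 : 1 ≤ n.toNat := by omega
  have hN : n.toNat ≤ ar.length := by omega
  show (List.range' 1 (Nat.log2 n.toNat + 1 - 1)).foldl _
      ((List.range n.toNat).foldl _ _) = _
  rw [init_eq ar n.toNat (Nat.log2 n.toNat + 1) hN (by omega)]
  exact outer_eq ar n.toNat (Nat.log2 n.toNat + 1) hN hN1 rfl _ (le_refl _)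

-- B builds exactly the filled table
theorem make_alt_eq_ptab (ar : List Int) (n : Int) (hpre : Pre_make ar n) :
    make_alt ar n = ptab ar n.toNat (Nat.log2 n.toNat + 1) (Nat.log2 n.toNat + 1 - 1) := by
  obtain ⟨h1, h2⟩ := hpre
  have hN : n.toNat ≤ ar.length := by omega
  show (List.range n.toNat).map _ = _
  rw [ptab]
  apply map_range_congr
  intro i hi
  apply map_range_congr
  intro j hj
  rw [if_pos (by omega : j ≤ Nat.log2 n.toNat + 1 - 1)]
  by_cases hj0 : j = 0
  · subst hj0
    rw [if_pos rfl, entry, if_pos (by omega : i + 2 ^ 0 ≤ n.toNat), pow_zero,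
      seg_single ar i (by omega)]
  · rw [if_neg hj0, entry]
    by_cases hin : i + 2 ^ j ≤ n.toNat
    · rw [if_pos hin, if_pos hin]
      exact rangeGcd_eq_segGcd ar i (2 ^ j) (by omega) (Nat.one_le_two_pow)
    · rw [if_neg hin, if_neg hin]

-- ===== VERDICT (by name: the statement is the Claim_ definition above) =====
theorem make_spec : Claim_equal_make := by
  intro ar n _hdom hpre
  unfold Spec_make
  rw [make_eq_ptab ar n hpre, make_alt_eq_ptab ar n hpre]
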